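-- pv_equiv track=rewrite | github.com/kyzima-spb/script.module.vk_api | lib/vk_video/vk_video.py | _select_best_quality
-- ===== SOURCE A (Python) =====
-- import typing as t
--
-- def _select_best_quality(
--
--     files: t.Dict[str, str],
--     quality: int = -1,
--     preferred_order: t.Tuple[str, ...] = (
--         'dash_ondemand', 'hls_ondemand', 'hls', 'dash_sep', 'dash_webm', 'mp4', 'failover_host',
--     ),
-- ) -> t.Tuple[str, str]:
--     """Returns the format name and URL to the video in the best quality."""
--     for fmt in preferred_order:
--         if fmt in files:
--             return fmt, files[fmt]
--
--         if fmt == 'mp4':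
--             quality_list = sorted(
--                 (i for i in files.keys() if i.startswith('mp4_')),
--                 key=lambda x: int(x.split('_')[1]),
--                 reverse=True,
--             )
--
--             if quality < 0:
--                 fmt = quality_list[0]
--                 return fmt, files[fmt]
--
--             quality = max(144, quality)
--
--             for i in quality_list:
--                 if int(i.split('_')[1]) <= quality:
--                     return i, files[i]
--
--     raise ValueError('Unknown video format or quality.')
-- ===== SOURCE B (Python) =====
-- def _select_best_quality(
--     files,
--     quality=-1,
--     preferred_order=(
--         'dash_ondemand', 'hls_ondemand', 'hls', 'dash_sep', 'dash_webm', 'mp4', 'failover_host',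
--     ),
-- ):
--     """Returns the format name and URL to the video in the best quality."""
--     for fmt in preferred_order:
--         if fmt in files:
--             return fmt, files[fmt]
--
--         if fmt == 'mp4':
--             limit = None if quality < 0 else max(144, quality)
--             best = None  # (value, key): largest admissible value, first key on ties
--             for key in files:
--                 if key.startswith('mp4_'):
--                     value = int(key.split('_')[1])
--                     if (limit is None or value <= limit) and (best is None or value > best[0]):
--                         best = (value, key)
--             if best is not None:
--                 return best[1], files[best[1]]
--
--     raise ValueError('Unknown video format or quality.')
-- ===== Notes on version B (the rewrite author's own statement) =====
-- stated objective: alternative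
-- what changed: A builds the list of mp4_ keys and sorts it descending by parsed quality before picking an element; B never sorts, making one max-tracking pass over the keys that keeps the best admissible (value, key) pair (strict comparison so the first key in iteration order wins ties).
-- crash fix: When the mp4 branch is reached with quality < 0 and the dict has no mp4_ key but a later preferred format is present, A raises IndexError on quality_list[0] while B falls through and returns that later format. — e.g. on _select_best_quality([("failover_host", "u")], -1, ["mp4", "failover_host"]): A raises IndexError, B returns ("failover_host", "u")
import Mathlib
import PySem

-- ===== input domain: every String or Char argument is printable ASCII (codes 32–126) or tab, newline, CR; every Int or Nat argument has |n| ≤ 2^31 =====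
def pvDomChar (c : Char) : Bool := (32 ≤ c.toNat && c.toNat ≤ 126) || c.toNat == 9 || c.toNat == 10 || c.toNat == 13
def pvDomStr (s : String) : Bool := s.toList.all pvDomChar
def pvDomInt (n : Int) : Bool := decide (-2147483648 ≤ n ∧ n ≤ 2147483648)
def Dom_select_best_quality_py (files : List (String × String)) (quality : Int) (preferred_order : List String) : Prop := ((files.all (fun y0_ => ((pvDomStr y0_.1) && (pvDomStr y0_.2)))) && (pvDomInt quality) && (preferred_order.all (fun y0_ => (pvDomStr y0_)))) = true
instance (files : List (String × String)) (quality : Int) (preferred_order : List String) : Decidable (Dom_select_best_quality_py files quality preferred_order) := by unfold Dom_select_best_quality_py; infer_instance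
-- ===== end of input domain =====

-- B replaces A's build-and-sort of the mp4_ candidates by a single max-tracking pass over
-- the keys (no sorted list is materialised); return values are proved equal wherever A returns.

-- ===== PORT A =====
-- key.split('_')[1]  (keys reaching it start with "mp4_", so index 1 exists)
def pvSuffix (k : String) : String := ((PySem.Str.split? k "_").getD []).getD 1 ""
-- int(key.split('_')[1]); total form used only where Pre_ guarantees the parse succeeds
def pvVal (k : String) : Int := (PySem.Int.ofStr? (pvSuffix k)).getD 0

-- the 'for fmt in preferred_order' loop of A
def select_best_quality_py_go (d : PySem.Dict String String) (quality : Int) : List String → String × String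
  | [] => ("", "")            -- raise ValueError (outside Pre_)
  | fmt :: rest =>
    if d.contains fmt then (fmt, d.getD fmt "")
    else if fmt = "mp4" then
      let mp4s := d.keys.filter (fun k => PySem.Str.startswith k "mp4_")
      if mp4s.all (fun k => (PySem.Int.ofStr? (pvSuffix k)).isSome) then
        let qualityList := PySem.List.sorted mp4s pvVal true
        if quality < 0 then
          match qualityList with
          | [] => ("", "")    -- quality_list[0]: IndexError (outside Pre_)
          | f :: _ => (f, d.getD f "")
        else
          let q := max 144 quality
          match qualityList.find? (fun i => decide (pvVal i ≤ q)) with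
          | some i => (i, d.getD i "")
          | none => select_best_quality_py_go d q rest
      else ("", "")           -- int() raises ValueError while sorting (outside Pre_)
    else select_best_quality_py_go d quality rest

def select_best_quality_py (files : List (String × String)) (quality : Int) (preferred_order : List String) : String × String :=
  select_best_quality_py_go (PySem.Dict.ofList files) quality preferred_order

-- ===== PORT B =====
-- body of B's single pass: fold one key into the running best (value, key) pair
def selBStep (limit : Option Int) (best : Option (Int × String)) (key : String) : Option (Int × String) :=
  if PySem.Str.startswith key "mp4_" then
    match PySem.Int.ofStr? (pvSuffix key) with
    | some value =>
      if (limit.all fun t => decide (value ≤ t)) && (best.all fun b => decide (b.1 < value)) then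
        some (value, key)
      else best
    | none => best            -- int() raises ValueError here in B's Python (outside Pre_)
  else best

-- the 'for fmt in preferred_order' loop of B
def select_best_quality_py_alt_go (d : PySem.Dict String String) (quality : Int) : List String → String × String
  | [] => ("", "")            -- raise ValueError (outside Pre_)
  | fmt :: rest =>
    if d.contains fmt then (fmt, d.getD fmt "")
    else if fmt = "mp4" then
      let limit : Option Int := if quality < 0 then none else some (max 144 quality)
      match d.keys.foldl (selBStep limit) none with
      | some best => (best.2, d.getD best.2 "")
      | none => select_best_quality_py_alt_go d quality rest
    else select_best_quality_py_alt_go d quality rest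

def select_best_quality_py_alt (files : List (String × String)) (quality : Int) (preferred_order : List String) : String × String :=
  select_best_quality_py_alt_go (PySem.Dict.ofList files) quality preferred_order

-- ===== PRECONDITION & SPEC =====
-- Pre_ is exactly "A returns normally": some preferred format is found, and — when the 'mp4'
-- branch is reached — every mp4_ key has an int suffix (else int() raises ValueError) and,
-- for quality < 0, at least one mp4_ key exists (else quality_list[0] raises IndexError).
def Pre_select_best_quality_py (files : List (String × String)) (quality : Int) (preferred_order : List String) : Prop :=
  let d := PySem.Dict.ofList files
  let mp4s := d.keys.filter (fun k => PySem.Str.startswith k "mp4_")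
  let reached := "mp4" ∈ preferred_order ∧
    (∀ f ∈ preferred_order.takeWhile (· ≠ "mp4"), d.contains f = false) ∧
    d.contains "mp4" = false
  (reached → (∀ k ∈ mp4s, (PySem.Int.ofStr? (pvSuffix k)).isSome = true) ∧ (quality < 0 → mp4s ≠ [])) ∧
  ((∃ f ∈ preferred_order, d.contains f = true) ∨
    (reached ∧ (quality < 0 ∨ ∃ k ∈ mp4s, pvVal k ≤ max 144 quality)))
instance (files : List (String × String)) (quality : Int) (preferred_order : List String) : Decidable (Pre_select_best_quality_py files quality preferred_order) := by unfold Pre_select_best_quality_py; infer_instance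

def pvWitness_select_best_quality_py : (List (String × String)) × Int × List String :=
  ([("mp4_720", "u")], -1, ["mp4"])

-- Where the 'mp4' branch is reached with quality < 0 and no mp4_ key at all but a later
-- preferred format is available, A raises IndexError; B falls through and returns that format.
def Raises_select_best_quality_py (files : List (String × String)) (quality : Int) (preferred_order : List String) : Prop :=
  let d := PySem.Dict.ofList files
  ("mp4" ∈ preferred_order ∧
    (∀ f ∈ preferred_order.takeWhile (· ≠ "mp4"), d.contains f = false) ∧
    d.contains "mp4" = false) ∧
  quality < 0 ∧
  d.keys.filter (fun k => PySem.Str.startswith k "mp4_") = [] ∧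
  (∃ f ∈ preferred_order, d.contains f = true)
instance (files : List (String × String)) (quality : Int) (preferred_order : List String) : Decidable (Raises_select_best_quality_py files quality preferred_order) := by unfold Raises_select_best_quality_py; infer_instance

def pvRaiseWitness_select_best_quality_py : (List (String × String)) × Int × List String :=
  ([("failover_host", "u")], -1, ["mp4", "failover_host"])
def pvRaiseWitnessOut_select_best_quality_py : String × String := ("failover_host", "u")

def Spec_select_best_quality_py (files : List (String × String)) (quality : Int) (preferred_order : List String) (out : String × String) : Prop := out = select_best_quality_py_alt files quality preferred_order
instance (files : List (String × String)) (quality : Int) (preferred_order : List String) (out : String × String) : Decidable (Spec_select_best_quality_py files quality preferred_order out) := by unfold Spec_select_best_quality_py; infer_instance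

-- ===== CLAIM (what is proved, stated in full; the proofs are below) =====
def Claim_equal_select_best_quality_py : Prop := ∀ (files : List (String × String)) (quality : Int) (preferred_order : List String), Dom_select_best_quality_py files quality preferred_order → Pre_select_best_quality_py files quality preferred_order → Spec_select_best_quality_py files quality preferred_order (select_best_quality_py files quality preferred_order)

def Claim_raises_select_best_quality_py : Prop := (∀ (files : List (String × String)) (quality : Int) (preferred_order : List String), Dom_select_best_quality_py files quality preferred_order → Raises_select_best_quality_py files quality preferred_order → ¬ Pre_select_best_quality_py files quality preferred_order) ∧ (Dom_select_best_quality_py (pvRaiseWitness_select_best_quality_py.1) (pvRaiseWitness_select_best_quality_py.2.1) (pvRaiseWitness_select_best_quality_py.2.2) ∧ Raises_select_best_quality_py (pvRaiseWitness_select_best_quality_py.1) (pvRaiseWitness_select_best_quality_py.2.1) (pvRaiseWitness_select_best_quality_py.2.2) ∧ select_best_quality_py_alt (pvRaiseWitness_select_best_quality_py.1) (pvRaiseWitness_select_best_quality_py.2.1) (pvRaiseWitness_select_best_quality_py.2.2) = pvRaiseWitnessOut_select_best_quality_py)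

-- ===== LEMMAS AND PROOFS =====

-- the abstract step B's pass performs, keyed on the key string only
def pvStep (P : String → Bool) (acc : Option String) (x : String) : Option String :=
  if P x && acc.all (fun z => decide (pvVal z < pvVal x)) then some x else acc

theorem find?_insertBy (P : String → Bool) (x : String) (s : List String)
    (hs : s.Pairwise (fun a b => pvVal b ≤ pvVal a)) :
    (PySem.List.insertBy (fun a b => decide (pvVal b < pvVal a)) x s).find? P
      = pvStep P (s.find? P) x := by
  induction s with
  | nil => simp [PySem.List.insertBy, pvStep, List.find?]
  | cons y ys ih =>
    rw [List.pairwise_cons] at hs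
    obtain ⟨hy, hys⟩ := hs
    simp only [PySem.List.insertBy]
    by_cases hlt : pvVal y < pvVal x
    · simp only [hlt, decide_true, if_true]
      by_cases hPx : P x
      · rcases hfy : (y :: ys).find? P with _ | z
        · simp [List.find?_cons, hPx, pvStep]
        · have hz : z ∈ y :: ys := List.mem_of_find?_eq_some hfy
          have hzy : pvVal z ≤ pvVal y := by
            rcases List.mem_cons.mp hz with h | h
            · exact h ▸ le_refl _
            · exact hy z h
          simp [pvStep, hPx, lt_of_le_of_lt hzy hlt]
      · simp [List.find?_cons, hPx, pvStep]
    · simp only [hlt, decide_false, Bool.false_eq_true, if_false]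
      rcases hPy : P y with _ | _
      · simp [List.find?_cons, hPy, ih hys]
      · simp [List.find?_cons, hPy, pvStep, not_lt.mp hlt]

theorem find?_sorted_eq_foldl (l : List String) (P : String → Bool) :
    (PySem.List.sorted l pvVal true).find? P = l.foldl (pvStep P) none := by
  induction l using List.reverseRecOn with
  | nil => simp [PySem.List.sorted]
  | append_singleton l x ih =>
    have hsort : PySem.List.sorted (l ++ [x]) pvVal true
        = PySem.List.insertBy (fun a b => decide (pvVal b < pvVal a)) x
            (PySem.List.sorted l pvVal true) := by
      simp [PySem.List.sorted, List.foldl_append]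
    rw [hsort, List.foldl_append,
      find?_insertBy P x _ (PySem.List.sorted_pairwise_rev l pvVal), ih]
    rfl

-- B's inner pass over the kept keys, with every parse known to succeed, is the abstract pass
theorem foldl_parsed (limit : Option Int) (l : List String)
    (hp : ∀ k ∈ l, (PySem.Int.ofStr? (pvSuffix k)).isSome = true) :
    ∀ acc : Option String,
    l.foldl (fun best key =>
      match PySem.Int.ofStr? (pvSuffix key) with
      | some value =>
        if (limit.all fun t => decide (value ≤ t)) && (best.all fun b => decide (b.1 < value)) then
          some (value, key)
        else best
      | none => best) (acc.map (fun k => (pvVal k, k)))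
      = (l.foldl (pvStep (fun k => limit.all fun t => decide (pvVal k ≤ t))) acc).map
          (fun k => (pvVal k, k)) := by
  induction l with
  | nil => intro acc; rfl
  | cons y ys ih =>
    intro acc
    have hy := hp y (List.mem_cons_self ..)
    obtain ⟨v, hv⟩ := Option.isSome_iff_exists.mp hy
    have hval : pvVal y = v := by simp [pvVal, hv]
    have hstep : (match PySem.Int.ofStr? (pvSuffix y) with
      | some value =>
        if (limit.all fun t => decide (value ≤ t)) && ((acc.map (fun k => (pvVal k, k))).all fun b => decide (b.1 < value)) then
          some (value, y)
        else acc.map (fun k => (pvVal k, k))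
      | none => acc.map (fun k => (pvVal k, k)))
        = (pvStep (fun k => limit.all fun t => decide (pvVal k ≤ t)) acc y).map (fun k => (pvVal k, k)) := by
      rw [hv]
      cases acc with
      | none => simp [pvStep, hval]
      | some a =>
        simp only [pvStep, Option.map_some, Option.all_some, hval]
        by_cases h1 : (limit.all fun t => decide (v ≤ t)) = true
        · by_cases h2 : pvVal a < v
          · simp [h1, h2, hval]
          · simp [h1, h2]
        · simp only [h1, Bool.false_and, if_neg, Bool.false_eq_true,
            not_false_eq_true, Option.map_some]
    simp only [List.foldl_cons, hstep]
    exact ih (fun k hk => hp k (List.mem_cons_of_mem _ hk)) _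

theorem foldl_selBStep (d : PySem.Dict String String) (limit : Option Int)
    (hp : ∀ k ∈ d.keys.filter (fun k => PySem.Str.startswith k "mp4_"),
      (PySem.Int.ofStr? (pvSuffix k)).isSome = true) :
    d.keys.foldl (selBStep limit) none
      = ((d.keys.filter (fun k => PySem.Str.startswith k "mp4_")).foldl
          (pvStep (fun k => limit.all fun t => decide (pvVal k ≤ t))) none).map
          (fun k => (pvVal k, k)) := by
  rw [← foldl_parsed limit _ hp none, List.foldl_filter]
  rfl

theorem go_eq (d : PySem.Dict String String) :
    ∀ (po : List String) (q1 q2 : Int),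
    (q1 < 0 ↔ q2 < 0) → max 144 q1 = max 144 q2 →
    (("mp4" ∈ po ∧ (∀ f ∈ po.takeWhile (· ≠ "mp4"), d.contains f = false) ∧
        d.contains "mp4" = false) →
      (∀ k ∈ d.keys.filter (fun k => PySem.Str.startswith k "mp4_"),
        (PySem.Int.ofStr? (pvSuffix k)).isSome = true) ∧
      (q2 < 0 → d.keys.filter (fun k => PySem.Str.startswith k "mp4_") ≠ [])) →
    select_best_quality_py_go d q1 po = select_best_quality_py_alt_go d q2 po := by
  intro po
  induction po with
  | nil => intro q1 q2 _ _ _; rfl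
  | cons fmt rest ih =>
    intro q1 q2 hiff hmax hpre
    by_cases hc : d.contains fmt = true
    · simp [select_best_quality_py_go, select_best_quality_py_alt_go, hc]
    · replace hc : d.contains fmt = false := Bool.eq_false_iff.mpr hc
      by_cases hm : fmt = "mp4"
      · subst hm
        have hreach : "mp4" ∈ ("mp4" :: rest) ∧
            (∀ f ∈ ("mp4" :: rest).takeWhile (· ≠ "mp4"), d.contains f = false) ∧
            d.contains "mp4" = false := by
          refine ⟨List.mem_cons_self .., ?_, hc⟩
          simp [List.takeWhile]
        obtain ⟨hp, hq⟩ := hpre hreach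
        have hall : (d.keys.filter (fun k => PySem.Str.startswith k "mp4_")).all
            (fun k => (PySem.Int.ofStr? (pvSuffix k)).isSome) = true :=
          List.all_eq_true.mpr (fun k hk => hp k hk)
        simp only [select_best_quality_py_go, select_best_quality_py_alt_go, hc,
          Bool.false_eq_true, if_false, if_true, hall, reduceIte]
        rw [foldl_selBStep d _ hp, ← find?_sorted_eq_foldl]
        by_cases hq1 : q1 < 0
        · have hq2 : q2 < 0 := hiff.mp hq1
          simp only [hq1, hq2, if_true, reduceIte]
          rcases hsl : PySem.List.sorted
              (d.keys.filter (fun k => PySem.Str.startswith k "mp4_")) pvVal true with _ | ⟨f, fs⟩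
          · exfalso
            have := PySem.List.sorted_perm
              (d.keys.filter (fun k => PySem.Str.startswith k "mp4_")) pvVal true
            rw [hsl] at this
            exact hq hq2 this.symm.eq_nil
          · rfl
        · have hq2 : ¬ q2 < 0 := fun h => hq1 (hiff.mpr h)
          simp only [hq1, hq2, if_false, reduceIte]
          have hDP : (fun i => decide (pvVal i ≤ max 144 q1))
              = (fun k => (some (max 144 q2)).all fun t => decide (pvVal k ≤ t)) := by
            funext i; rw [hmax]; rfl
          rw [hDP]
          rcases hfind : (PySem.List.sorted
              (d.keys.filter (fun k => PySem.Str.startswith k "mp4_")) pvVal true).find?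
              (fun k => (some (max 144 q2)).all fun t => decide (pvVal k ≤ t)) with _ | i
          · simp only [Option.map_none]
            exact ih (max 144 q1) q2 (by constructor <;> intro h <;> omega) (by omega)
              (fun _ => ⟨hp, fun h => absurd h hq2⟩)
          · rfl
      · have hstep : ∀ q, select_best_quality_py_go d q (fmt :: rest)
            = select_best_quality_py_go d q rest := by
          intro q
          simp [select_best_quality_py_go, hc, hm]
        have hstep' : select_best_quality_py_alt_go d q2 (fmt :: rest)
            = select_best_quality_py_alt_go d q2 rest := by
          simp [select_best_quality_py_alt_go, hc, hm]
        rw [hstep, hstep']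
        refine ih q1 q2 hiff hmax (fun hr => hpre ⟨List.mem_cons_of_mem _ hr.1, ?_, hr.2.2⟩)
        intro f hf
        rw [List.takeWhile_cons, if_pos (by simp [hm])] at hf
        rcases List.mem_cons.mp hf with h | h
        · exact h ▸ hc
        · exact hr.2.1 f h

-- ===== VERDICT (by name: the statement is the Claim_ definition above) =====
theorem select_best_quality_py_spec : Claim_equal_select_best_quality_py := by
  intro files quality preferred_order _ hpre
  unfold Spec_select_best_quality_py select_best_quality_py select_best_quality_py_alt
  obtain ⟨h1, _⟩ := hpre
  exact go_eq (PySem.Dict.ofList files) preferred_order quality quality Iff.rfl rfl h1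

def select_best_quality_py_raises : Claim_raises_select_best_quality_py := by
  unfold Claim_raises_select_best_quality_py
  constructor
  · intro files quality preferred_order _ hr hpre
    obtain ⟨hreach, hq, hempty, _⟩ := hr
    obtain ⟨h1, _⟩ := hpre
    exact (h1 hreach).2 hq hempty
  · decide
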